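-- pv_equiv track=rewrite | github.com/Mariah0-0/minesweeper_game | minesweeper.py | sur
-- ===== SOURCE A (Python) =====
-- def sur(r,c):
--     sur = []
--     for r1 in range(0,10):
--         for c1 in range(0,10):
--             if r==r1 and c==c1:
--                 continue
--             if r1 in range(r-1,r+2) and c1 in range(c-1,c+2):
--                 sur.append((r1,c1))
--     return sur
-- ===== SOURCE B (Python) =====
-- def sur(r, c):
--     res = []
--     for r1 in range(r - 1, r + 2):
--         for c1 in range(c - 1, c + 2):
--             if r1 == r and c1 == c:
--                 continue
--             if 0 <= r1 <= 9 and 0 <= c1 <= 9: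
--                 res.append((r1, c1))
--     return res
-- ===== Notes on version B (the rewrite author's own statement) =====
-- stated objective: alternative
-- what changed: Instead of scanning all 100 cells of the 10x10 grid and testing each for membership in the 3x3 neighborhood, B loops directly over the (at most 9) cells of the 3x3 neighborhood and keeps the in-grid ones, preserving row-major order.
import Mathlib
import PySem

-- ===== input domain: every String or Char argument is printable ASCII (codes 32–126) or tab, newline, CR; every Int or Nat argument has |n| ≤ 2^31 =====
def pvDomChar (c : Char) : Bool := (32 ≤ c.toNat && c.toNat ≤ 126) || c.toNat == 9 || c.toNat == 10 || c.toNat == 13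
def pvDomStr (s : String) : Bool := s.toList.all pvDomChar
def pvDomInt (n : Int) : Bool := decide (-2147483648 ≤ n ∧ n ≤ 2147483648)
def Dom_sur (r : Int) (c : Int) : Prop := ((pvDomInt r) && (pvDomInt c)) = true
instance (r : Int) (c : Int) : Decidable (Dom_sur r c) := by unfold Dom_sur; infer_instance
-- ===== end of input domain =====

-- B replaces A's scan of all 100 grid cells (testing each for membership in the 3x3
-- neighborhood) by a direct loop over the at-most-9 neighborhood cells with a bounds check;
-- same return value everywhere (both runtimes are tiny; no speed claim).

-- ===== PORT A =====
def sur (r : Int) (c : Int) : List (Int × Int) :=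
  (PySem.List.pyRange 0 10).foldl (fun acc r1 =>
    (PySem.List.pyRange 0 10).foldl (fun acc c1 =>
      if r = r1 ∧ c = c1 then acc
      else if r1 ∈ PySem.List.pyRange (r - 1) (r + 2) ∧ c1 ∈ PySem.List.pyRange (c - 1) (c + 2) then
        acc ++ [(r1, c1)]
      else acc) acc) []

-- ===== PORT B =====
def sur_alt (r : Int) (c : Int) : List (Int × Int) :=
  (PySem.List.pyRange (r - 1) (r + 2)).foldl (fun acc r1 =>
    (PySem.List.pyRange (c - 1) (c + 2)).foldl (fun acc c1 =>
      if r1 = r ∧ c1 = c then acc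
      else if (0 ≤ r1 ∧ r1 ≤ 9) ∧ (0 ≤ c1 ∧ c1 ≤ 9) then
        acc ++ [(r1, c1)]
      else acc) acc) []

-- ===== PRECONDITION & SPEC =====
def Spec_sur (r : Int) (c : Int) (out : List (Int × Int)) : Prop := out = sur_alt r c
instance (r : Int) (c : Int) (out : List (Int × Int)) : Decidable (Spec_sur r c out) := by unfold Spec_sur; infer_instance

-- ===== CLAIM (what is proved, stated in full; the proofs are below) =====
def Claim_equal_sur : Prop := ∀ (r : Int) (c : Int), Dom_sur r c → Spec_sur r c (sur r c)

-- ===== LEMMAS AND PROOFS =====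

-- canonical form both ports are reduced to: row-major scan of the clipped 3x3 box, center removed
def surCore (r : Int) (c : Int) : List (Int × Int) :=
  (PySem.List.pyRange (max 0 (r - 1)) (min 10 (r + 2))).flatMap (fun r1 =>
    ((PySem.List.pyRange (max 0 (c - 1)) (min 10 (c + 2))).filter
      (fun c1 => !decide (r = r1 ∧ c = c1))).map (fun c1 => (r1, c1)))

lemma flatMap_congr_mem {α β : Type} (l : List α) (f g : α → List β)
    (h : ∀ x ∈ l, f x = g x) : l.flatMap f = l.flatMap g := by
  induction l with
  | nil => rfl
  | cons a l ih =>
    simp only [List.flatMap_cons]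
    rw [h a (List.mem_cons_self), ih (fun x hx => h x (List.mem_cons_of_mem a hx))]

lemma flatMap_eq_flatMap_filter {α β : Type} (l : List α) (p : α → Bool) (f : α → List β)
    (h : ∀ x ∈ l, p x = false → f x = []) : l.flatMap f = (l.filter p).flatMap f := by
  induction l with
  | nil => rfl
  | cons a l ih =>
    have ih' := ih (fun x hx hp => h x (List.mem_cons_of_mem a hx) hp)
    cases hp : p a with
    | true => simp [List.flatMap_cons, hp, ih']
    | false => simp [List.flatMap_cons, hp, h a List.mem_cons_self hp, ih']

lemma filter_pyRange (lo hi : Int) : ∀ (n : Nat) (a b : Int), (b - a).toNat = n →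
    (PySem.List.pyRange a b).filter (fun x => decide (lo ≤ x ∧ x < hi))
      = PySem.List.pyRange (max a lo) (min b hi) := by
  intro n
  induction n with
  | zero =>
    intro a b h
    rw [PySem.List.pyRange_one_eq_nil (by omega), PySem.List.pyRange_one_eq_nil (by omega)]
    rfl
  | succ n ih =>
    intro a b h
    rw [PySem.List.pyRange_one_cons (by omega), List.filter_cons, ih (a + 1) b (by omega)]
    have hab : a < b := by omega
    by_cases hp : lo ≤ a ∧ a < hi
    · have h1 : max (a + 1) lo = a + 1 := by omega
      have h2 : max a lo = a := by omega
      rw [h1, h2, PySem.List.pyRange_one_cons (show a < min b hi by omega)]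
      simp [hp.1, hp.2]
    · by_cases hlo : a < lo
      · have h1 : max (a + 1) lo = lo := by omega
        have h2 : max a lo = lo := by omega
        rw [h1, h2]
        simp [hp]
      · rw [PySem.List.pyRange_one_eq_nil (show min b hi ≤ max (a + 1) lo by omega),
          PySem.List.pyRange_one_eq_nil (show min b hi ≤ max a lo by omega)]
        simp [hp]

lemma sur_eq_core (r c : Int) : sur r c = surCore r c := by
  unfold sur surCore
  -- inner loop → append of a filtered map
  rw [PySem.List.foldl_congr_mem _ _
    (fun acc r1 => acc ++ ((PySem.List.pyRange 0 10).filter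
      (fun c1 => !decide (r = r1 ∧ c = c1)
        && decide (r1 ∈ PySem.List.pyRange (r - 1) (r + 2) ∧ c1 ∈ PySem.List.pyRange (c - 1) (c + 2)))).map
      (fun c1 => (r1, c1))) _ ?_]
  · rw [PySem.List.foldl_append_eq_flatMap, List.nil_append]
    rw [flatMap_eq_flatMap_filter _ (fun r1 => decide (r - 1 ≤ r1 ∧ r1 < r + 2)) _ ?_]
    · rw [filter_pyRange (r - 1) (r + 2) ((10 : Int) - 0).toNat 0 10 rfl]
      apply flatMap_congr_mem
      intro r1 hr1
      have hr : r - 1 ≤ r1 ∧ r1 < r + 2 := by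
        have := PySem.List.mem_pyRange_one.mp hr1; omega
      rw [List.filter_congr (q := fun c1 =>
        (!decide (r = r1 ∧ c = c1)) && decide (c - 1 ≤ c1 ∧ c1 < c + 2)) ?_]
      · rw [← List.filter_filter, filter_pyRange (c - 1) (c + 2) ((10 : Int) - 0).toNat 0 10 rfl]
      · intro c1 _
        simp [PySem.List.mem_pyRange_one, hr.1, hr.2]
    · intro r1 _ hp
      simp only [List.map_eq_nil_iff, List.filter_eq_nil_iff]
      intro c1 _
      simp only [decide_eq_false_iff_not, Bool.and_eq_true, Bool.not_eq_true',
        decide_eq_true_eq, not_and, PySem.List.mem_pyRange_one] at hp ⊢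
      omega
  · intro acc r1 _
    beta_reduce
    rw [← PySem.List.foldl_append_if]
    apply PySem.List.foldl_congr_mem
    intro acc2 c1 _
    by_cases h1 : r = r1 ∧ c = c1
    · simp [h1]
    · by_cases h2 : r1 ∈ PySem.List.pyRange (r - 1) (r + 2) ∧ c1 ∈ PySem.List.pyRange (c - 1) (c + 2) <;>
        simp [h1, h2]

lemma sur_alt_eq_core (r c : Int) : sur_alt r c = surCore r c := by
  unfold sur_alt surCore
  rw [PySem.List.foldl_congr_mem _ _
    (fun acc r1 => acc ++ ((PySem.List.pyRange (c - 1) (c + 2)).filter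
      (fun c1 => !decide (r1 = r ∧ c1 = c)
        && decide ((0 ≤ r1 ∧ r1 ≤ 9) ∧ (0 ≤ c1 ∧ c1 ≤ 9)))).map
      (fun c1 => (r1, c1))) _ ?_]
  · rw [PySem.List.foldl_append_eq_flatMap, List.nil_append]
    rw [flatMap_eq_flatMap_filter _ (fun r1 => decide (0 ≤ r1 ∧ r1 < 10)) _ ?_]
    · rw [filter_pyRange 0 10 (r + 2 - (r - 1)).toNat (r - 1) (r + 2) rfl]
      rw [max_comm (r - 1) 0, min_comm (r + 2) 10]
      apply flatMap_congr_mem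
      intro r1 hr1
      have hr : 0 ≤ r1 ∧ r1 < 10 := by
        have := PySem.List.mem_pyRange_one.mp hr1; omega
      rw [List.filter_congr (q := fun c1 =>
        (!decide (r = r1 ∧ c = c1)) && decide (0 ≤ c1 ∧ c1 < 10)) ?_]
      · rw [← List.filter_filter, filter_pyRange 0 10 (c + 2 - (c - 1)).toNat (c - 1) (c + 2) rfl]
        rw [max_comm (c - 1) 0, min_comm (c + 2) 10]
      · intro c1 _
        have hcomm : (r1 = r ∧ c1 = c) ↔ (r = r1 ∧ c = c1) := by
          constructor <;> rintro ⟨h1, h2⟩ <;> exact ⟨h1.symm, h2.symm⟩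
        have h9r : (r1 ≤ 9) ↔ (r1 < 10) := by omega
        have h9c : ∀ x : Int, (x ≤ 9) ↔ (x < 10) := by intro x; omega
        simp [hcomm, hr.1, hr.2, h9r, h9c]
    · intro r1 _ hp
      simp only [List.map_eq_nil_iff, List.filter_eq_nil_iff]
      intro c1 _
      simp only [decide_eq_false_iff_not, Bool.and_eq_true, Bool.not_eq_true',
        decide_eq_true_eq, not_and] at hp ⊢
      omega
  · intro acc r1 _
    beta_reduce
    rw [← PySem.List.foldl_append_if]
    apply PySem.List.foldl_congr_mem
    intro acc2 c1 _
    by_cases h1 : r1 = r ∧ c1 = c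
    · simp [h1]
    · by_cases h2 : (0 ≤ r1 ∧ r1 ≤ 9) ∧ (0 ≤ c1 ∧ c1 ≤ 9) <;> simp [h1, h2]

-- ===== VERDICT (by name: the statement is the Claim_ definition above) =====
theorem sur_spec : Claim_equal_sur := by
  intro r c _
  unfold Spec_sur
  rw [sur_eq_core, sur_alt_eq_core]
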